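-- pv_equiv track=rewrite | github.com/jiangenhua/Data-structure-and-algorithm-Python- | code/ch04/chapter4递归.py | realign_num
-- ===== SOURCE A (Python) =====
-- def realign_num(data):
--     if len(data) == 1:
--         return data
--     elif data[0] % 2 == 1:
--         data.append(data.pop(0))
--         return data[:1] + realign_num(data[1:])
--     elif data[0] % 2 == 0:
--         return data[:1] + realign_num(data[1:])
-- ===== SOURCE B (Python) =====
-- def realign_num(data):
--     d = list(data)
--     out = []
--     i = 0
--     while len(d) - i > 1:
--         x = d[i]
--         i += 1
--         if x % 2 == 1:
--             d.append(x)
--             x = d[i]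
--             i += 1
--         out.append(x)
--     out.append(d[i])
--     return out
-- ===== Notes on version B (the rewrite author's own statement) =====
-- stated objective: faster
-- what changed: Replaces A's O(n^2) recursion (each step slices the list, concatenates, and recurses on a fresh copy) with a single iterative pass that simulates a deque via a read index into a working list that only grows at the back.
-- outside the precondition, e.g. on realign_num([]): A raises IndexError, B raises IndexError
import Mathlib
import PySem

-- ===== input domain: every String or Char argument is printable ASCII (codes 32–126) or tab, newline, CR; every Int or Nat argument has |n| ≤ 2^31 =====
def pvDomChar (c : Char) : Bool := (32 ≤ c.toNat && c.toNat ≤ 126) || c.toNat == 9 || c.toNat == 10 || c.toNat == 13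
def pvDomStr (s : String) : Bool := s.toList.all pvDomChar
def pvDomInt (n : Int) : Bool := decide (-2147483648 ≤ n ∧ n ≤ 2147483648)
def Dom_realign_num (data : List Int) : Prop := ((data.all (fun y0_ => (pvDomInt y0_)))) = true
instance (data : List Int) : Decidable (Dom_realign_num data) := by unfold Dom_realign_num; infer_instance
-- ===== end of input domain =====

-- B replaces A's O(n^2) recursion with slicing/concatenation by a one-pass iterative
-- deque simulation (objective: faster, asymptotic). Equivalence is about the RETURN
-- value only: Python A rotates the caller's list in place, B does not mutate it.

-- ===== PORT A =====
-- A's recursion: len==1 → data; odd head → rotate head to back, emit new head, recurse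
-- on the rest; even head → emit head, recurse on the rest.  [] (A raises IndexError,
-- excluded by Pre_) returns [].
def realign_num (data : List Int) : List Int :=
  if data.length == 1 then data
  else
    match data with
    | [] => []   -- A raises IndexError here; outside Pre_
    | x :: rest =>
      if PySem.Int.mod x 2 == 1 then
        -- data.append(data.pop(0)); return data[:1] + realign_num(data[1:])
        let d := rest ++ [x]
        d.take 1 ++ realign_num (d.drop 1)
      else if PySem.Int.mod x 2 == 0 then
        (x :: rest).take 1 ++ realign_num ((x :: rest).drop 1)
      else []    -- unreachable for integers (mod 2 ∈ {0,1})
termination_by data.length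
decreasing_by
  all_goals simp

-- ===== PORT B =====
-- B's loop: out, index i into a working list d that only grows at the back.
def realignLoop (d : List Int) (i : Nat) (out : List Int) : List Int :=
  if d.length - i > 1 then
    let x := d.getD i 0
    if PySem.Int.mod x 2 == 1 then
      let d' := d ++ [x]
      realignLoop d' (i + 2) (out ++ [d'.getD (i + 1) 0])
    else
      realignLoop d (i + 1) (out ++ [x])
  else
    out ++ [d.getD i 0]
termination_by d.length - i
decreasing_by
  all_goals first | (simp; omega) | simp | omega

def realign_num_alt (data : List Int) : List Int :=
  realignLoop data 0 []

-- ===== PRECONDITION & SPEC =====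
-- Pre_ excludes only the empty list, on which both Pythons raise IndexError.
def Pre_realign_num (data : List Int) : Prop := data ≠ []
instance (data : List Int) : Decidable (Pre_realign_num data) := by unfold Pre_realign_num; infer_instance
def pvWitness_realign_num : List Int := [1, 2, 3, 4]

def Spec_realign_num (data : List Int) (out : List Int) : Prop := out = realign_num_alt data
instance (data : List Int) (out : List Int) : Decidable (Spec_realign_num data out) := by unfold Spec_realign_num; infer_instance

-- ===== CLAIM (what is proved, stated in full; the proofs are below) =====
def Claim_equal_realign_num : Prop := ∀ (data : List Int), Dom_realign_num data → Pre_realign_num data → Spec_realign_num data (realign_num data)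

-- ===== LEMMAS AND PROOFS =====

-- The loop with prefix of d consumed up to i computes out ++ A's result on the suffix.
theorem realignLoop_eq (d : List Int) (i : Nat) (out : List Int) (h : i < d.length) :
    realignLoop d i out = out ++ realign_num (d.drop i) := by
  rw [realignLoop]
  have hdrop : d.drop i = d[i] :: d.drop (i + 1) := List.drop_eq_getElem_cons h
  have hgetD : d.getD i 0 = d[i] := List.getD_eq_getElem d 0 h
  have hmem : PySem.Int.mod d[i] 2 = d[i] % 2 := PySem.Int.mod_eq_emod_of_pos (by norm_num)
  by_cases hlen : d.length - i > 1
  · simp only [if_pos hlen, hgetD]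
    by_cases hodd : PySem.Int.mod d[i] 2 == 1
    · have hm : d[i] % 2 = 1 := by rw [hmem] at hodd; exact eq_of_beq hodd
      simp only [if_pos hodd]
      have hlt : i + 1 < d.length := by omega
      have h2 : i + 2 < (d ++ [d[i]]).length := by simp; omega
      rw [realignLoop_eq (d ++ [d[i]]) (i + 2) _ h2]
      have hg1 : (d ++ [d[i]]).getD (i + 1) 0 = d[i + 1] := by
        rw [List.getD_eq_getElem _ 0 (by simp; omega)]
        simp [List.getElem_append_left hlt]
      -- A's odd branch on d.drop i
      have hA : realign_num (d.drop i) =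
          (d.drop (i + 1) ++ [d[i]]).take 1 ++ realign_num ((d.drop (i + 1) ++ [d[i]]).drop 1) := by
        rw [hdrop, realign_num]
        rw [if_neg (by simp; omega : ¬ (((d[i] :: d.drop (i + 1)).length == 1) = true))]
        rw [if_pos hodd]
      have hdrop1 : d.drop (i + 1) = d[i + 1] :: d.drop (i + 2) := List.drop_eq_getElem_cons hlt
      have hdd : (d ++ [d[i]]).drop (i + 2) = d.drop (i + 2) ++ [d[i]] :=
        List.drop_append_of_le_length (by omega)
      have e1 : List.take 1 (List.drop (i + 1) d ++ [d[i]]) = [d[i + 1]] := by rw [hdrop1]; rfl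
      have e2 : List.drop 1 (List.drop (i + 1) d ++ [d[i]]) = List.drop (i + 2) d ++ [d[i]] := by
        rw [hdrop1]; rfl
      rw [hA, hg1, hdd, e1, e2, List.append_assoc]
    · have hm0 : d[i] % 2 = 0 := by
        rcases PySem.Int.mod_two_eq d[i] with h0 | h1
        · rw [hmem] at h0; exact h0
        · exact absurd (by rw [h1]; rfl : (PySem.Int.mod d[i] 2 == 1) = true) hodd
      simp only [if_neg hodd]
      rw [realignLoop_eq d (i + 1) _ (by omega)]
      have hA : realign_num (d.drop i) = d[i] :: realign_num (d.drop (i + 1)) := by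
        rw [hdrop, realign_num]
        rw [if_neg (by simp; omega : ¬ (((d[i] :: d.drop (i + 1)).length == 1) = true))]
        rw [if_neg hodd]
        rw [if_pos (by rw [hmem, hm0]; rfl : (PySem.Int.mod d[i] 2 == 0) = true)]
        have t1 : List.take 1 (d[i] :: List.drop (i + 1) d) = [d[i]] := rfl
        have t2 : List.drop 1 (d[i] :: List.drop (i + 1) d) = List.drop (i + 1) d := rfl
        rw [t1, t2]
        rfl
      rw [hA, List.append_assoc]
      rfl
  · -- exactly one element left: d.drop i = [d[i]]
    simp only [if_neg hlen, hgetD]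
    have hone : d.drop (i + 1) = [] := by
      apply List.drop_eq_nil_of_le; omega
    rw [hdrop, hone, realign_num]
    rw [if_pos (by rfl : (([d[i]] : List Int).length == 1) = true)]
termination_by d.length - i
decreasing_by
  all_goals first | (simp; omega) | simp | omega

-- ===== VERDICT (by name: the statement is the Claim_ definition above) =====
theorem realign_num_spec : Claim_equal_realign_num := by
  intro data _ hpre
  unfold Spec_realign_num realign_num_alt
  have h0 : 0 < data.length := List.length_pos_of_ne_nil hpre
  rw [realignLoop_eq data 0 [] h0]
  simp
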